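-- pv_equiv track=rewrite | github.com/AndrewMarksArt/CS_Python_HW | Week_4/hw3pr2.py | jscore
-- ===== SOURCE A (Python) =====
-- def jscore (S, T):
--     c = 0
--     match = [False] * len(T)
--     for ch in S:
--         for i in range(len(T)):
--             if ch == T[i] and match[i] is False:
--                 match[i] = True
--                 c += 1
--                 break
--     return c
-- ===== SOURCE B (Python) =====
-- def jscore(S, T):
--     s = sorted(S)
--     t = sorted(T)
--     i = j = c = 0
--     while i < len(s) and j < len(t):
--         if s[i] == t[j]:
--             c += 1
--             i += 1
--             j += 1
--         elif s[i] < t[j]: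
--             i += 1
--         else:
--             j += 1
--     return c
-- ===== Notes on version B (the rewrite author's own statement) =====
-- stated objective: faster
-- what changed: Replaced A's per-character scan of T with a boolean match array (O(|S|*|T|)) by sorting both strings and counting common characters in a single two-pointer merge pass.
import Mathlib
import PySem

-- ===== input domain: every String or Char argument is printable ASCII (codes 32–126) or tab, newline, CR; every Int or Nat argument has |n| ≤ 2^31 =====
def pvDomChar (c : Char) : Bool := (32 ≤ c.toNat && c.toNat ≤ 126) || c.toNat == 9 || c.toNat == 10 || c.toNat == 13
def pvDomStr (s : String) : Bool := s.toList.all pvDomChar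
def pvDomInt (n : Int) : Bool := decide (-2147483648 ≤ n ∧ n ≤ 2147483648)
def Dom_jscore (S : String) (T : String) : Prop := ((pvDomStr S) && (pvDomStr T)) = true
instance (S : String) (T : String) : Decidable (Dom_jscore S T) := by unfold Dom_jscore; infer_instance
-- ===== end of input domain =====

-- B replaces A's nested scan over a boolean match array by sort-both-then-one-merge-pass; objective: alternative algorithm (O((m+n)log) vs O(m·n)).

-- ===== PORT A =====
-- inner loop: 'for i in range(len(T)): if ch == T[i] and match[i] is False: match[i]=True; c+=1; break'
-- transliterated as a lockstep scan of T and the match array (the index i walks both), returning the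
-- updated match array and the increment to c (1 on break, 0 if the loop runs off the end).
def jscoreInner (ch : Char) : List Char → List Bool → List Bool × Int
  | [], m => (m, 0)
  | _ :: _, [] => ([], 0)
  | tc :: ts, b :: bs =>
    if ch = tc ∧ b = false then (true :: bs, 1)
    else
      let r := jscoreInner ch ts bs
      (b :: r.1, r.2)

def jscore (S : String) (T : String) : Int :=
  let tl := T.toList
  (S.toList.foldl
    (fun (st : List Bool × Int) ch =>
      let r := jscoreInner ch tl st.1
      (r.1, st.2 + r.2))
    (List.replicate tl.length false, 0)).2

-- ===== PORT B =====
-- two-pointer merge over the two sorted character lists (the while loop of Source B)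
def mergeCount : List Char → List Char → Int
  | [], _ => 0
  | _ :: _, [] => 0
  | a :: s, b :: t =>
    if a = b then 1 + mergeCount s t
    else if a < b then mergeCount s (b :: t)
    else mergeCount (a :: s) t
termination_by s t => s.length + t.length

def jscore_alt (S : String) (T : String) : Int :=
  mergeCount (PySem.List.sorted S.toList (fun x => x) false)
             (PySem.List.sorted T.toList (fun x => x) false)

-- ===== PRECONDITION & SPEC =====
def Spec_jscore (S : String) (T : String) (out : Int) : Prop := out = jscore_alt S T
instance (S : String) (T : String) (out : Int) : Decidable (Spec_jscore S T out) := by unfold Spec_jscore; infer_instance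

-- ===== CLAIM (what is proved, stated in full; the proofs are below) =====
def Claim_equal_jscore : Prop := ∀ (S : String) (T : String), Dom_jscore S T → Spec_jscore S T (jscore S T)

-- ===== LEMMAS AND PROOFS =====

-- the multiset of still-unmatched characters of T
def remChars : List Char → List Bool → List Char
  | [], _ => []
  | _ :: _, [] => []
  | tc :: ts, b :: bs => if b then remChars ts bs else tc :: remChars ts bs

-- abstract greedy count: one removal per character of S found in the remaining pool
def greedy : List Char → List Char → Int
  | [], _ => 0
  | ch :: s, r => (if ch ∈ r then (1 : Int) else 0) + greedy s (r.erase ch)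

lemma remChars_replicate (t : List Char) : remChars t (List.replicate t.length false) = t := by
  induction t with
  | nil => rfl
  | cons a t ih => simp [List.replicate_succ, remChars, ih]

lemma jscoreInner_spec (ch : Char) (t : List Char) (m : List Bool) :
    (jscoreInner ch t m).2 = (if ch ∈ remChars t m then (1 : Int) else 0) ∧
    remChars t (jscoreInner ch t m).1 = (remChars t m).erase ch := by
  induction t generalizing m with
  | nil => simp [jscoreInner, remChars]
  | cons tc ts ih =>
    cases m with
    | nil => simp [jscoreInner, remChars]
    | cons b bs =>
      by_cases h : ch = tc ∧ b = false
      · obtain ⟨h1, h2⟩ := h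
        subst h1 h2
        simp [jscoreInner, remChars]
      · rw [jscoreInner, if_neg h]
        obtain ⟨ih1, ih2⟩ := ih bs
        cases b with
        | false =>
          have hne : ch ≠ tc := by intro hc; exact h ⟨hc, rfl⟩
          simp only [remChars, if_neg Bool.false_ne_true]
          constructor
          · simpa [List.mem_cons, hne] using ih1
          · simp [Ne.symm hne, ih2]
        | true =>
          simpa [remChars] using ⟨ih1, ih2⟩

lemma foldl_greedy (t : List Char) (s : List Char) (m : List Bool) (c : Int) :
    (s.foldl
      (fun (st : List Bool × Int) ch =>
        let r := jscoreInner ch t st.1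
        (r.1, st.2 + r.2))
      (m, c)).2 = c + greedy s (remChars t m) := by
  induction s generalizing m c with
  | nil => simp [greedy]
  | cons ch s ih =>
    obtain ⟨h1, h2⟩ := jscoreInner_spec ch t m
    simp only [List.foldl_cons]
    rw [ih]
    rw [h2, greedy, h1]
    ring

lemma greedy_card_inter (s r : List Char) :
    greedy s r = (Multiset.card ((↑s : Multiset Char) ∩ ↑r) : Int) := by
  induction s generalizing r with
  | nil => simp [greedy]
  | cons ch s ih =>
    rw [greedy, ih]
    rw [show ((↑(ch :: s) : Multiset Char)) = ch ::ₘ ↑s from rfl]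
    by_cases h : ch ∈ r
    · have hm : ch ∈ (↑r : Multiset Char) := by simpa using h
      rw [Multiset.cons_inter_of_pos _ hm]
      simp [Multiset.coe_erase, h]
      ring
    · have hm : ch ∉ (↑r : Multiset Char) := by simpa using h
      rw [List.erase_of_not_mem h]
      rw [Multiset.cons_inter_of_neg _ hm]
      simp [h]

lemma not_mem_of_lt_head {a b : Char} {t : List Char}
    (hs : (b :: t).Pairwise (· ≤ ·)) (hab : a < b) : a ∉ b :: t := by
  intro hmem
  rcases List.mem_cons.mp hmem with h | h
  · exact absurd (h ▸ hab) (lt_irrefl _)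
  · have hb : b ≤ a := (List.pairwise_cons.mp hs).1 a h
    exact absurd (lt_of_lt_of_le hab hb) (lt_irrefl _)

lemma mergeCount_card_inter : ∀ (l1 l2 : List Char),
    l1.Pairwise (· ≤ ·) → l2.Pairwise (· ≤ ·) →
    mergeCount l1 l2 = (Multiset.card ((↑l1 : Multiset Char) ∩ ↑l2) : Int) := by
  intro l1 l2
  fun_induction mergeCount l1 l2 with
  | case1 l2 => intro _ _; simp
  | case2 a s => intro _ _; simp
  | case3 s a t ih =>
    intro h1 h2
    have hm : a ∈ (↑(a :: t) : Multiset Char) := by simp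
    rw [show ((↑(a :: s) : Multiset Char)) = a ::ₘ ↑s from rfl,
        Multiset.cons_inter_of_pos _ hm]
    have he : (↑(a :: t) : Multiset Char).erase a = ↑t := by
      rw [show ((↑(a :: t) : Multiset Char)) = a ::ₘ ↑t from rfl, Multiset.erase_cons_head]
    rw [he, ih h1.of_cons h2.of_cons, Multiset.card_cons]
    push_cast
    ring
  | case4 a s b t hab hlt ih =>
    intro h1 h2
    have hnm : a ∉ (↑(b :: t) : Multiset Char) := by
      simpa using not_mem_of_lt_head h2 hlt
    rw [show ((↑(a :: s) : Multiset Char)) = a ::ₘ ↑s from rfl,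
        Multiset.cons_inter_of_neg _ hnm]
    exact ih h1.of_cons h2
  | case5 a s b t hab hlt ih =>
    intro h1 h2
    have hba : b < a := lt_of_le_of_ne (not_lt.mp hlt) (fun hh => hab hh.symm)
    have hnb : b ∉ a :: s := not_mem_of_lt_head h1 hba
    have heq : (↑(a :: s) : Multiset Char) ∩ ↑(b :: t) = (↑(a :: s) : Multiset Char) ∩ ↑t := by
      ext x
      simp only [Multiset.count_inter]
      by_cases hx : x = b
      · subst hx
        have h0 : Multiset.count x (↑(a :: s) : Multiset Char) = 0 :=
          Multiset.count_eq_zero.mpr (by simpa using hnb)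
        simp [h0]
      · have : Multiset.count x (↑(b :: t) : Multiset Char) = Multiset.count x (↑t : Multiset Char) := by
          rw [show ((↑(b :: t) : Multiset Char)) = b ::ₘ ↑t from rfl]
          exact Multiset.count_cons_of_ne hx _
        rw [this]
    rw [heq]
    exact ih h1 h2.of_cons

-- ===== VERDICT (by name: the statement is the Claim_ definition above) =====
theorem jscore_spec : Claim_equal_jscore := by
  intro S T _
  unfold Spec_jscore jscore jscore_alt
  rw [foldl_greedy, remChars_replicate, greedy_card_inter]
  rw [zero_add]
  rw [mergeCount_card_inter _ _
    (by simpa using PySem.List.sorted_pairwise S.toList (fun x => x))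
    (by simpa using PySem.List.sorted_pairwise T.toList (fun x => x))]
  rw [Multiset.coe_eq_coe.mpr (PySem.List.sorted_perm S.toList (fun x => x) false),
      Multiset.coe_eq_coe.mpr (PySem.List.sorted_perm T.toList (fun x => x) false)]
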